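-- pv_equiv track=rewrite | github.com/djkostyan4ik/pp1 | 04-Subroutines/After class/ex44/exercise44.py | f
-- ===== SOURCE A (Python) =====
-- def f(password):
--     a = ''
--     length = len(password)
--     for i in password:
--         if i == a:
--             return False
--         a = i
--         if i != a:
--             return True
--     if length >= 6:
--         return True
--     else:
--         return False
-- ===== SOURCE B (Python) =====
-- def f(password):
--     # valid iff long enough and no doubled character occurs as a substring
--     return len(password) >= 6 and not any(c + c in password for c in set(password))
-- ===== Notes on version B (the rewrite author's own statement) =====
-- stated objective: alternative
-- what changed: Replaced A's sequential previous-character scan with early returns by a length guard plus a substring-search test: for each distinct character c, check whether the doubled string c+c occurs in password.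
import Mathlib
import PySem

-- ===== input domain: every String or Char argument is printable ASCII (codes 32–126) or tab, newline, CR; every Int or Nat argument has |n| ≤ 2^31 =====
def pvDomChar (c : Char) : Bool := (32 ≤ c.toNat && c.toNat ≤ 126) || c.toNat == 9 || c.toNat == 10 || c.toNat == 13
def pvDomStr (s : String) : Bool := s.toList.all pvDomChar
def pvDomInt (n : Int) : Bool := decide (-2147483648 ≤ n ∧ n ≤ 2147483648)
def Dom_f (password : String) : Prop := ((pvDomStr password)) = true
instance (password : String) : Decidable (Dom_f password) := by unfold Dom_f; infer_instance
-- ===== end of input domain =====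

-- B replaces A's sequential previous-character scan (early returns) with a length guard
-- plus a substring-search test: c+c occurs in password for some distinct c (objective: alternative).

-- ===== PORT A =====
-- the loop: a starts as '', each char compared with the previous; the second branch
-- (i != a right after a = i) is kept literally although it can never fire
def fLoop (length : Int) : List Char → String → Bool
  | [], _ => decide (length ≥ 6)
  | i :: rest, a =>
    if String.singleton i == a then false
    else if String.singleton i != String.singleton i then true
    else fLoop length rest (String.singleton i)

def f (password : String) : Bool :=
  fLoop (password.toList.length : Int) password.toList ""

-- ===== PORT B =====
-- len(password) >= 6 and not any(c + c in password for c in set(password))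
def f_alt (password : String) : Bool :=
  decide ((PySem.Str.len password : Int) ≥ 6) &&
    !((PySem.Set.ofList password.toList).any
        (fun c => PySem.Str.isIn (String.ofList [c, c]) password))

-- ===== PRECONDITION & SPEC =====
def Spec_f (password : String) (out : Bool) : Prop := out = f_alt password
instance (password : String) (out : Bool) : Decidable (Spec_f password out) := by unfold Spec_f; infer_instance

-- ===== CLAIM (what is proved, stated in full; the proofs are below) =====
def Claim_equal_f : Prop := ∀ (password : String), Dom_f password → Spec_f password (f password)

-- ===== LEMMAS AND PROOFS =====

-- A's loop with previous char p: adjacent-distinct test on (p :: l) zipped with l, and the length guard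
theorem fLoop_singleton (len : Int) :
    ∀ (l : List Char) (p : Char),
      fLoop len l (String.singleton p)
        = ((((p :: l).zip l).all (fun q => q.1 != q.2)) && decide (len ≥ 6)) := by
  intro l
  induction l with
  | nil => intro p; simp [fLoop]
  | cons c rest ih =>
    intro p
    simp only [fLoop, List.zip_cons_cons, List.all_cons, ih c]
    by_cases h : c = p
    · subst h; simp
    · have h1 : (String.singleton c == String.singleton p) = false := by
        simp only [beq_eq_false_iff_ne, ne_eq, ← String.toList_inj, String.toList_singleton,
          List.cons.injEq, and_true]
        exact h
      simp [h1, Ne.symm h, Bool.and_assoc]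

theorem fLoop_empty (len : Int) (l : List Char) :
    fLoop len l "" = ((l.zip l.tail).all (fun q => q.1 != q.2) && decide (len ≥ 6)) := by
  cases l with
  | nil => simp [fLoop]
  | cons c rest =>
    have h0 : (String.singleton c == ("" : String)) = false := by
      simp [String.singleton]
    simp [fLoop, h0, fLoop_singleton]

-- a doubled character occurs as an infix iff some adjacent pair is equal
theorem hasAdj_iff : ∀ (l : List Char),
    ((l.zip l.tail).any (fun q => q.1 == q.2) = true) ↔ ∃ c, [c, c] <:+: l := by
  intro l
  induction l with
  | nil => simp
  | cons x t ih =>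
    cases t with
    | nil =>
      simp only [List.tail_cons, List.zip_nil_right, List.any_nil, Bool.false_eq_true,
        false_iff, not_exists]
      intro c hc
      have := hc.length_le
      simp at this
    | cons y t' =>
      simp only [List.tail_cons, List.zip_cons_cons, List.any_cons, Bool.or_eq_true,
        beq_iff_eq] at *
      constructor
      · rintro (h | h)
        · subst h
          exact ⟨x, List.IsPrefix.isInfix ⟨t', rfl⟩⟩
        · obtain ⟨c, hc⟩ := ih.mp h
          exact ⟨c, hc.trans (List.infix_cons_iff.mpr (Or.inr (List.infix_refl _)))⟩
      · rintro ⟨c, hc⟩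
        rcases List.infix_cons_iff.mp hc with hpre | hinf
        · rcases List.cons_prefix_cons.mp hpre with ⟨hcx, hpre'⟩
          rcases List.cons_prefix_cons.mp hpre' with ⟨hcy, _⟩
          exact Or.inl (hcx ▸ hcy)
        · exact Or.inr (ih.mpr ⟨c, hinf⟩)

-- the set-based any of B equals the pairwise test of A's loop (negated)
theorem all_ne_eq_not_any (password : String) :
    ((password.toList.zip password.toList.tail).all (fun q => q.1 != q.2))
      = !((PySem.Set.ofList password.toList).any
            (fun c => PySem.Str.isIn (String.ofList [c, c]) password)) := by
  set l := password.toList with hl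
  have hset : ((PySem.Set.ofList l).any
      (fun c => PySem.Str.isIn (String.ofList [c, c]) password) = true) ↔ ∃ c, [c, c] <:+: l := by
    rw [List.any_eq_true]
    constructor
    · rintro ⟨c, _, hc⟩
      exact ⟨c, by simpa [← hl, String.toList_ofList] using (PySem.Str.isIn_iff_infix _ _).mp hc⟩
    · rintro ⟨c, hc⟩
      refine ⟨c, ?_, (PySem.Str.isIn_iff_infix _ _).mpr (by simpa [← hl, String.toList_ofList] using hc)⟩
      exact (PySem.Set.mem_ofList _ _).mpr (hc.subset (by simp))
  have hall : ((l.zip l.tail).all (fun q => q.1 != q.2) = true)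
      ↔ ¬ ((l.zip l.tail).any (fun q => q.1 == q.2) = true) := by
    simp only [List.all_eq_true, List.any_eq_true, not_exists, bne_iff_ne, ne_eq,
      Prod.forall, beq_iff_eq, Prod.exists, not_and]
  have h2 : ((PySem.Set.ofList l).any
      (fun c => PySem.Str.isIn (String.ofList [c, c]) password) = true)
      ↔ ((l.zip l.tail).any (fun q => q.1 == q.2) = true) :=
    hset.trans (hasAdj_iff l).symm
  rw [Bool.eq_iff_iff, Bool.not_eq_true', Bool.eq_false_iff, hall]
  exact not_congr h2.symm

-- ===== VERDICT (by name: the statement is the Claim_ definition above) =====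
theorem f_spec : Claim_equal_f := by
  intro password _
  unfold Spec_f f f_alt
  rw [fLoop_empty, all_ne_eq_not_any, Bool.and_comm]
  simp [PySem.Str.len_eq]
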